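-- pv_equiv track=rewrite | github.com/stivenmelo/ESTILOS-Y-LENGUAJES-DE-PROGRAMACION_PARADIGMAS-Y-TECNICAS | Parcial/Imperativo/Ejercicio2.py | pares_cero
-- ===== SOURCE A (Python) =====
-- def pares_cero(lista):
--     if not lista:
--         return []
--
--     vistos = set()
--     pares = []
--
--     for numero in lista:
--         negativo = -numero
--         if negativo in vistos:
--             par = (min(numero, negativo), max(numero, negativo))
--             if par not in pares:
--                 pares.append(par)
--         else:
--             vistos.add(numero)
--
--     return pares
-- ===== SOURCE B (Python) =====
-- def pares_cero(lista):
--     pares = []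
--     for j in range(len(lista)):
--         for i in range(j):
--             if lista[i] + lista[j] == 0:
--                 par = (min(lista[i], lista[j]), max(lista[i], lista[j]))
--                 if par not in pares:
--                     pares.append(par)
--     return pares
-- ===== Notes on version B (the rewrite author's own statement) =====
-- stated objective: simpler
-- what changed: Replaced the seen-set/conditional-insert state machine by a plain nested index loop: for each position j scan the earlier positions i < j for a zero-sum partner and append the (min,max) pair if not already collected.
import Mathlib
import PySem

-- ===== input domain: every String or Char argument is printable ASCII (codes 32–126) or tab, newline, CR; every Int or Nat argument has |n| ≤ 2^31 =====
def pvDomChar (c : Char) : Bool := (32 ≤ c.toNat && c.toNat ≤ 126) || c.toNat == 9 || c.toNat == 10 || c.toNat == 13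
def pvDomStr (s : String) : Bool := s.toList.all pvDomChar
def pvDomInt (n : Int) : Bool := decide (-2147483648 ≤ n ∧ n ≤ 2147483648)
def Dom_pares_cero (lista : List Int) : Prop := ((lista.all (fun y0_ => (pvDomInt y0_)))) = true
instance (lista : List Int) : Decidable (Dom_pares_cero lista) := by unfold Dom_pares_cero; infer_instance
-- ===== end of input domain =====

-- B replaces A's seen-set bookkeeping by a plain nested index scan over earlier positions (simpler, same exact output).

-- ===== PORT A =====
def stepA (st : PySem.Set Int × List (Int × Int)) (numero : Int) : PySem.Set Int × List (Int × Int) :=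
  let negativo := -numero
  if negativo ∈ st.1 then
    let par := (min numero negativo, max numero negativo)
    if par ∈ st.2 then st else (st.1, st.2 ++ [par])
  else (PySem.Set.add st.1 numero, st.2)

def pares_cero (lista : List Int) : List (Int × Int) :=
  if lista = [] then []
  else (lista.foldl stepA (PySem.Set.empty, [])).2

-- ===== PORT B =====
def innerStepB (lista : List Int) (j : Int) (pares : List (Int × Int)) (i : Int) : List (Int × Int) :=
  if PySem.List.pyGetD lista i 0 + PySem.List.pyGetD lista j 0 = 0 then
    let par := (min (PySem.List.pyGetD lista i 0) (PySem.List.pyGetD lista j 0),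
                max (PySem.List.pyGetD lista i 0) (PySem.List.pyGetD lista j 0))
    if par ∈ pares then pares else pares ++ [par]
  else pares

def outerStepB (lista : List Int) (pares : List (Int × Int)) (j : Int) : List (Int × Int) :=
  (PySem.List.pyRange 0 j 1).foldl (innerStepB lista j) pares

def pares_cero_alt (lista : List Int) : List (Int × Int) :=
  (PySem.List.pyRange 0 (lista.length : Int) 1).foldl (outerStepB lista) []

-- ===== PRECONDITION & SPEC =====
def Spec_pares_cero (lista : List Int) (out : List (Int × Int)) : Prop := out = pares_cero_alt lista
instance (lista : List Int) (out : List (Int × Int)) : Decidable (Spec_pares_cero lista out) := by unfold Spec_pares_cero; infer_instance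

-- ===== CLAIM (what is proved, stated in full; the proofs are below) =====
def Claim_equal_pares_cero : Prop := ∀ (lista : List Int), Dom_pares_cero lista → Spec_pares_cero lista (pares_cero lista)

-- ===== LEMMAS AND PROOFS =====

/-- The zero-sum pair produced for an element `x`. -/
def pb (x : Int) : Int × Int := (min (-x) x, max (-x) x)

theorem pb_neg (x : Int) : pb (-x) = pb x := by
  simp [pb, min_comm, max_comm]

/-- Structural reference form of B: walk the list keeping the processed prefix. -/
def loopB (p : List Int) (res : List (Int × Int)) : List Int → List (Int × Int)
  | [] => res
  | x :: rest =>
      loopB (p ++ [x]) (if -x ∈ p ∧ pb x ∉ res then res ++ [pb x] else res) rest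

/-- The inner scan over a prefix `p` appends `pb b` once iff `-b` occurs in `p`. -/
theorem inner_fold_eq (p : List Int) (b : Int) (res : List (Int × Int)) :
    p.foldl (fun acc a =>
        if a + b = 0 then
          (if (min a b, max a b) ∈ acc then acc else acc ++ [(min a b, max a b)])
        else acc) res
      = if -b ∈ p ∧ pb b ∉ res then res ++ [pb b] else res := by
  induction p generalizing res with
  | nil => simp
  | cons a t ih =>
    simp only [List.foldl_cons]
    by_cases h : a + b = 0
    · have ha : a = -b := by omega
      subst ha
      have hpar : (min (-b) b, max (-b) b) = pb b := rfl
      rw [if_pos h, hpar]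
      by_cases hm : pb b ∈ res
      · rw [if_pos hm, ih]
        simp [hm]
      · rw [if_neg hm, ih]
        simp [hm, List.mem_append]
    · rw [if_neg h, ih]
      have : (-b ∈ a :: t) ↔ -b ∈ t := by
        constructor
        · intro hmem
          rcases List.mem_cons.mp hmem with h1 | h1
          · exfalso; omega
          · exact h1
        · intro hmem; exact List.mem_cons_of_mem _ hmem
      by_cases hm : -b ∈ t <;> simp [this, hm]

theorem pyGetD_append_left (p s : List Int) (i : Int) (h0 : 0 ≤ i)
    (h : i < (p.length : Int)) :
    PySem.List.pyGetD (p ++ s) i 0 = PySem.List.pyGetD p i 0 := by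
  rw [PySem.List.pyGetD_of_nonneg _ _ h0, PySem.List.pyGetD_of_nonneg _ _ h0]
  have hlt : i.toNat < p.length := by omega
  simp [List.getD, List.getElem?_append_left hlt]

theorem pyGetD_append_mid (p s : List Int) (x : Int) :
    PySem.List.pyGetD (p ++ x :: s) (p.length : Int) 0 = x := by
  simp [PySem.List.pyGetD, PySem.List.pyGet?_append_length]

/-- The port of B equals the structural reference form. -/
theorem outer_eq (s : List Int) : ∀ (p : List Int) (res : List (Int × Int)),
    (PySem.List.pyRange (p.length : Int) ((p.length : Int) + (s.length : Int)) 1).foldl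
        (outerStepB (p ++ s)) res = loopB p res s := by
  induction s with
  | nil => intro p res; simp [PySem.List.pyRange_one_eq_nil, loopB]
  | cons x t ih =>
    intro p res
    have hlt : (p.length : Int) < (p.length : Int) + ((x :: t).length : Int) := by
      simp only [List.length_cons]; push_cast; omega
    rw [PySem.List.pyRange_one_cons hlt]
    simp only [List.foldl_cons]
    have hstep : outerStepB (p ++ x :: t) res (p.length : Int)
        = if -x ∈ p ∧ pb x ∉ res then res ++ [pb x] else res := by
      unfold outerStepB
      have hx : PySem.List.pyGetD (p ++ x :: t) (p.length : Int) 0 = x :=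
        pyGetD_append_mid p t x
      have hcongr :
          (PySem.List.pyRange 0 (p.length : Int) 1).foldl
              (innerStepB (p ++ x :: t) (p.length : Int)) res
            = (PySem.List.pyRange 0 (PySem.List.len p) 1).foldl
              (fun acc i =>
                (fun acc2 a => if a + x = 0 then
                    (if (min a x, max a x) ∈ acc2 then acc2 else acc2 ++ [(min a x, max a x)])
                  else acc2) acc (PySem.List.pyGetD p i 0)) res := by
        rw [show (PySem.List.len p) = (p.length : Int) from by simp [PySem.List.len]]
        apply PySem.List.foldl_congr_mem
        intro acc i hi
        rcases PySem.List.mem_pyRange_one.mp hi with ⟨h0, h1⟩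
        unfold innerStepB
        rw [pyGetD_append_left p (x :: t) i h0 h1, hx]
      rw [hcongr]
      rw [PySem.List.foldl_pyRange_zero_pyGetD p 0
            (fun acc2 a => if a + x = 0 then
                (if (min a x, max a x) ∈ acc2 then acc2 else acc2 ++ [(min a x, max a x)])
              else acc2) res]
      exact inner_fold_eq p x res
    rw [hstep]
    have harr : (p.length : Int) + 1 = ((p ++ [x]).length : Int) := by simp
    have harr2 : (p.length : Int) + ((x :: t).length : Int)
        = ((p ++ [x]).length : Int) + (t.length : Int) := by simp; omega
    rw [harr, harr2, show p ++ x :: t = (p ++ [x]) ++ t from by simp]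
    exact ih (p ++ [x]) _

/-- Main invariant-carrying lemma: A's fold agrees with the reference loop. -/
theorem A_eq_loopB : ∀ (s p : List Int) (vistos : PySem.Set Int) (pares : List (Int × Int)),
    (∀ y ∈ vistos, y ∈ p) →
    (∀ y ∈ p, y ∈ vistos ∨ -y ∈ vistos) →
    (∀ y ∈ p, y ≠ 0 → -y ∈ p → pb y ∈ pares) →
    (2 ≤ p.count 0 → pb 0 ∈ pares) →
    (s.foldl stepA (vistos, pares)).2 = loopB p pares s := by
  intro s
  induction s with
  | nil => intro p vistos pares _ _ _ _; simp [loopB]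
  | cons x t ih =>
    intro p vistos pares inv1 inv2 inv3 inv4
    simp only [List.foldl_cons, loopB]
    by_cases h : -x ∈ vistos
    · -- A appends (or skips a duplicate pair)
      have hxp : -x ∈ p := inv1 _ h
      have hpar : (min x (-x), max x (-x)) = pb x := by
        simp [pb, min_comm, max_comm]
      have hstep : stepA (vistos, pares) x
          = (vistos, if pb x ∈ pares then pares else pares ++ [pb x]) := by
        unfold stepA
        rw [if_pos h, hpar]
        by_cases hm : pb x ∈ pares <;> simp [hm]
      rw [hstep]
      set pares' := if pb x ∈ pares then pares else pares ++ [pb x] with hp'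
      have hsub : ∀ q ∈ pares, q ∈ pares' := by
        intro q hq; by_cases hm : pb x ∈ pares <;> simp [hp', hm, hq]
      have hpbx : pb x ∈ pares' := by
        by_cases hm : pb x ∈ pares <;> simp [hp', hm]
      have hB : (if -x ∈ p ∧ pb x ∉ pares then pares ++ [pb x] else pares) = pares' := by
        by_cases hm : pb x ∈ pares <;> simp [hp', hm, hxp]
      rw [hB]
      apply ih (p ++ [x]) vistos pares'
      · intro y hy; exact List.mem_append_left _ (inv1 _ hy)
      · intro y hy
        rcases List.mem_append.mp hy with h1 | h1
        · exact inv2 _ h1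
        · have : y = x := by simpa using h1
          subst this; exact Or.inr h
      · intro y hy hy0 hny
        rcases List.mem_append.mp hy with h1 | h1
        · rcases List.mem_append.mp hny with h2 | h2
          · exact hsub _ (inv3 _ h1 hy0 h2)
          · have : -y = x := by simpa using h2
            have : y = -x := by omega
            subst this; rw [pb_neg]; exact hpbx
        · have : y = x := by simpa using h1
          subst this; exact hpbx
      · intro hc
        by_cases hx0 : x = 0
        · subst hx0; exact hpbx
        · have : (p ++ [x]).count 0 = p.count 0 := by
            simp [List.count_append, List.count_singleton, hx0]
          rw [this] at hc
          exact hsub _ (inv4 hc)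
    · -- A records x as seen; B finds no new pair either
      have hstep : stepA (vistos, pares) x = (PySem.Set.add vistos x, pares) := by
        unfold stepA; rw [if_neg h]
      have hkey : -x ∈ p → pb x ∈ pares := by
        intro hxp
        by_cases hx0 : x = 0
        · subst hx0
          have h0p : (0 : Int) ∈ p := by simpa using hxp
          rcases inv2 _ h0p with h1 | h1 <;> simp_all
        · rcases inv2 _ hxp with h1 | h1
          · exact absurd h1 h
          · have hxm : x ∈ p := inv1 _ (by simpa using h1)
            exact inv3 _ hxm hx0 hxp
      have hB : (if -x ∈ p ∧ pb x ∉ pares then pares ++ [pb x] else pares) = pares := by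
        by_cases hxp : -x ∈ p
        · simp [hxp, hkey hxp]
        · simp [hxp]
      rw [hstep, hB]
      apply ih (p ++ [x]) (PySem.Set.add vistos x) pares
      · intro y hy
        rcases (PySem.Set.mem_add vistos x y).mp hy with h1 | h1
        · exact List.mem_append_left _ (inv1 _ h1)
        · subst h1; exact List.mem_append_right _ (by simp)
      · intro y hy
        rcases List.mem_append.mp hy with h1 | h1
        · rcases inv2 _ h1 with h2 | h2
          · exact Or.inl ((PySem.Set.mem_add vistos x y).mpr (Or.inl h2))
          · exact Or.inr ((PySem.Set.mem_add vistos x (-y)).mpr (Or.inl h2))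
        · have : y = x := by simpa using h1
          subst this
          exact Or.inl ((PySem.Set.mem_add vistos y y).mpr (Or.inr rfl))
      · intro y hy hy0 hny
        rcases List.mem_append.mp hy with h1 | h1
        · rcases List.mem_append.mp hny with h2 | h2
          · exact inv3 _ h1 hy0 h2
          · have : -y = x := by simpa using h2
            have hyx : y = -x := by omega
            subst hyx
            rw [pb_neg]
            exact hkey (by simpa using h1)
        · have : y = x := by simpa using h1
          subst this
          rcases List.mem_append.mp hny with h2 | h2
          · exact hkey h2
          · have : -y = y := by simpa using h2
            exact absurd (by omega : y = 0) hy0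
      · intro hc
        by_cases hx0 : x = 0
        · exfalso
          subst hx0
          have h0np : (0 : Int) ∉ p := by
            intro h0p
            rcases inv2 _ h0p with h1 | h1 <;> simp_all
          have : p.count 0 = 0 := List.count_eq_zero_of_not_mem h0np
          simp [List.count_append, this, List.count_singleton] at hc
        · have : (p ++ [x]).count 0 = p.count 0 := by
            simp [List.count_append, List.count_singleton, hx0]
          rw [this] at hc
          exact inv4 hc

-- ===== VERDICT (by name: the statement is the Claim_ definition above) =====
theorem pares_cero_spec : Claim_equal_pares_cero := by
  intro lista _
  unfold Spec_pares_cero pares_cero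
  by_cases hnil : lista = []
  · subst hnil
    simp [pares_cero_alt, PySem.List.pyRange_one_eq_nil]
  · rw [if_neg hnil]
    have hA := A_eq_loopB lista [] PySem.Set.empty []
      (by intro y hy; simp [PySem.Set.empty] at hy)
      (by intro y hy; simp at hy)
      (by intro y hy; simp at hy)
      (by simp)
    rw [hA]
    have hB := outer_eq lista [] []
    simp only [List.length_nil, Int.ofNat_zero, List.nil_append] at hB
    rw [← hB]
    simp [pares_cero_alt]
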